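-- pv_equiv track=rewrite | github.com/OpenSecFlow/netdriver | packages/core/src/netdriver_core/utils/terminal.py | simulate_output
-- ===== SOURCE A (Python) =====
-- def simulate_output(input: str) -> str:
--     """ Simulate the terminal to handle char stream and get the compressed output
--     Input:
--       array-ag>enable\r\n
--       \rEnable password:\r\n
--       \r\n
--       \rarray-ag#switch vpndg\r\n
--       \r\r\n
--       \rvpndg$configure terminal\r\n
--       \r
--       \r\n
--       \rvpndg(config)$aaa map group \"                                                               \r
--       \rvpndg(config)$aaa map group \"San                                                            \r
--       \rvpndg(config)$aaa map group \"San F                                                         \r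
--       \rvpndg(config)$aaa map group \"San Fra                                                      \r
--       \rvpndg(config)$aaa map group \"San Fran                                                   \r
--       \rvpndg(config)$aaa map group \"San Franc                                                \r
--       \rvpndg(config)$aaa map group \"San Francis                                            \r
--       \rvpndg(config)$aaa map group \"San Francisco                                         \r
--       \rvpndg(config)$aaa map group \"San Francisco VPN                                   \r
--       \rvpndg(config)$aaa map group \"San Francisco VPN Group\" \"g-SF-VPN\"\b\b\b\b\r\n
--       \rAlready has a group map for external group \"San Francisco VPN Group\". \r\n
--       \rvpndg(config)$
--
--     Output:
--       array-ag>enable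
--       Enable password:
--
--       array-ag#switch vpndg
--
--       vpndg$configure terminal
--
--       vpndg(config)$aaa map group "San Francisco VPN Group" "g-SF-VPN"
--       Already has a group map for external group "San Francisco VPN Group".
--       vpndg(config)$
--     """
--     length = len(input)
--     lines = []
--     line = ""
--     i = 0
--     while i < length:
--         if is_carry_return(input[i:i+3]):
--             lines.append(line)
--             line = ""
--             i += 3
--         elif is_carry_return(input[i:i+2]):
--             lines.append(line)
--             line = ""
--             i += 2
--         elif input[i] == "\r":
--             line = ""
--             i += 1
--         else:
--             line += input[i]
--             i += 1
--     if line: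
--         lines.append(line)
--     return "\n".join(lines)
--
-- def is_carry_return(escape: str) -> bool:
--     return escape == "\r\r\n" or escape == "\r\n"
-- ===== SOURCE B (Python) =====
-- def simulate_output(input: str) -> str:
--     # Split once on "\r"; every "\r" is a boundary.  A part beginning with "\n"
--     # means the preceding "\r" was a "\r\n" (flush); an empty part whose successor
--     # begins with "\n" means a "\r\r\n" (single flush); any other boundary is a
--     # lone "\r" (discard current line).
--     parts = input.split("\r")
--     lines = []
--     line = parts[0]
--     k = 1
--     n = len(parts)
--     while k < n:
--         p = parts[k]
--         if p == "" and k + 1 < n and parts[k + 1].startswith("\n"):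
--             lines.append(line)
--             line = parts[k + 1][1:]
--             k += 2
--         elif p.startswith("\n"):
--             lines.append(line)
--             line = p[1:]
--             k += 1
--         else:
--             line = p
--             k += 1
--     if line:
--         lines.append(line)
--     return "\n".join(lines)
-- ===== Notes on version B (the rewrite author's own statement) =====
-- stated objective: faster
-- what changed: Replaces A's per-index loop (slice lookahead at every position and char-by-char string concatenation) by a single split on the CR character followed by one scan over the parts, classifying each boundary from whether the following part (or the one after an empty part) starts with a newline.
import Mathlib
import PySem

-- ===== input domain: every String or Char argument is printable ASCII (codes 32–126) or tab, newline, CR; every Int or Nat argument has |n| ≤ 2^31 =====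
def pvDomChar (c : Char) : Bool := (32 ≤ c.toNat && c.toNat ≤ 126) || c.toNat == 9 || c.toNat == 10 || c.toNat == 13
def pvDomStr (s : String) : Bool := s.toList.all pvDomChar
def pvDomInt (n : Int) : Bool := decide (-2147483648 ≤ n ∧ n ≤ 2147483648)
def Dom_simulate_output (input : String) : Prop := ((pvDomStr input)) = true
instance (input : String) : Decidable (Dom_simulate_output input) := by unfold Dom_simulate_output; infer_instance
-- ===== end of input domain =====

-- B replaces A's char-by-char scan (with 3/2/1-char lookahead slices) by one split
-- on "\r" followed by a scan over the parts; objective: alternative/idiomatic.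

-- ===== PORT A =====
-- A's slice tests input[i:i+3] == "\r\r\n" / input[i:i+2] == "\r\n" are exact
-- lookahead patterns on the remaining characters (a 2-char tail "\r\n" satisfies
-- the 3-char slice test too, with the same flush-and-skip-past-end effect), so the
-- while loop is transcribed as this recursion on the remaining character list; the
-- final `if line: lines.append(line)` of A is the base case.
def simAuxA : List Char → List Char → List (List Char) → List (List Char)
  | [], line, lines => if line = [] then lines else lines ++ [line]
  | '\r' :: '\r' :: '\n' :: rest, line, lines => simAuxA rest [] (lines ++ [line])
  | '\r' :: '\n' :: rest, line, lines => simAuxA rest [] (lines ++ [line])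
  | '\r' :: rest, _line, lines => simAuxA rest [] lines
  | c :: rest, line, lines => simAuxA rest (line ++ [c]) lines

-- "\n".join(lines), exact: char lists joined by '\n'
def simulate_output (input : String) : String :=
  String.mk (List.intercalate ['\n'] (simAuxA input.toList [] []))

-- ===== PORT B =====
-- splitCR = Python's input.split("\r") on the character list (keeps empty parts).
def splitCR : List Char → List (List Char)
  | [] => [[]]
  | '\r' :: t => [] :: splitCR t
  | c :: t =>
    match splitCR t with
    | p :: r => (c :: p) :: r
    | [] => [[c]]   -- unreachable: splitCR never returns []

-- Source B's while loop over parts[1:] (its k/k+1 lookahead written as patterns),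
-- with the final `if line: lines.append(line)` as the base case
def simAuxB : List (List Char) → List Char → List (List Char) → List (List Char)
  | [], line, lines => if line = [] then lines else lines ++ [line]
  | [] :: ('\n' :: q) :: rest, line, lines => simAuxB rest q (lines ++ [line])
  | ('\n' :: p) :: rest, line, lines => simAuxB rest p (lines ++ [line])
  | p :: rest, _line, lines => simAuxB rest p lines

def simulate_output_alt (input : String) : String :=
  let parts := splitCR input.toList
  String.mk (List.intercalate ['\n'] (simAuxB parts.tail parts.headI []))

-- ===== PRECONDITION & SPEC =====
def Spec_simulate_output (input : String) (out : String) : Prop := out = simulate_output_alt input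
instance (input : String) (out : String) : Decidable (Spec_simulate_output input out) := by unfold Spec_simulate_output; infer_instance

-- ===== CLAIM (what is proved, stated in full; the proofs are below) =====
def Claim_equal_simulate_output : Prop := ∀ (input : String), Dom_simulate_output input → Spec_simulate_output input (simulate_output input)

-- ===== LEMMAS AND PROOFS =====

theorem splitCR_ne_nil (t : List Char) : splitCR t ≠ [] := by
  cases t with
  | nil => simp [splitCR]
  | cons c u =>
    by_cases hc : c = '\r'
    · subst hc; rw [splitCR.eq_2]; simp
    · rw [splitCR.eq_3 c u (fun h => hc h)]
      cases splitCR u <;> simp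

theorem splitCR_cons_ne (c : Char) (t : List Char) (hc : c ≠ '\r') :
    splitCR (c :: t) = (c :: (splitCR t).headI) :: (splitCR t).tail := by
  rw [splitCR.eq_3 c t (fun h => hc h)]
  cases hh : splitCR t with
  | nil => exact absurd hh (splitCR_ne_nil t)
  | cons p r => simp

-- if t does not start with '\n', the first part of splitCR t does not either
theorem splitCR_head_not_nl (t : List Char) (h : ∀ u, t = '\n' :: u → False) :
    ∀ q r1, splitCR t = ('\n' :: q) :: r1 → False := by
  intro q r1 hq
  cases t with
  | nil => simp [splitCR] at hq
  | cons c u =>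
    by_cases hc : c = '\r'
    · subst hc; rw [splitCR.eq_2] at hq; simp at hq
    · rw [splitCR_cons_ne c u hc] at hq
      have : c = '\n' := by injection hq with h1 _; injection h1
      exact h u (by rw [this])

-- a lone "\r" boundary: the next part of splitCR just becomes the current line
theorem simAuxB_lone (rest line : List Char) (lines : List (List Char))
    (h1 : ∀ r1, rest = '\r' :: '\n' :: r1 → False)
    (h2 : ∀ r1, rest = '\n' :: r1 → False) :
    simAuxB (splitCR rest) line lines
      = simAuxB (splitCR rest).tail (splitCR rest).headI lines := by
  cases rest with
  | nil => simp [splitCR, simAuxB]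
  | cons c t =>
    by_cases hc : c = '\r'
    · subst hc
      rw [splitCR.eq_2]
      rw [simAuxB.eq_4 line lines [] (splitCR t)
        (fun q r1 _ hqr => splitCR_head_not_nl t (fun u hu => h1 u (by rw [hu])) q r1 hqr)
        (by intro p1 hp; cases hp)]
      simp
    · rw [splitCR_cons_ne c t hc]
      rw [simAuxB.eq_4 line lines (c :: (splitCR t).headI) (splitCR t).tail
        (by intro q r1 hp _; cases hp)
        (by intro p1 hp; exact h2 t (by injection hp with hcn _; rw [hcn]))]
      simp

theorem simAuxA_eq_simAuxB (cs line : List Char) (lines : List (List Char)) :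
    simAuxB (splitCR cs).tail (line ++ (splitCR cs).headI) lines = simAuxA cs line lines := by
  induction cs, line, lines using simAuxA.induct with
  | case1 lines => simp [splitCR, simAuxA, simAuxB]
  | case2 line lines h => simp [splitCR, simAuxA, simAuxB, h]
  | case3 rest line lines ih =>
    rw [show ('\r' :: '\r' :: '\n' :: rest) = '\r' :: '\r' :: '\n' :: rest from rfl,
      splitCR.eq_2, splitCR.eq_2, splitCR_cons_ne '\n' rest (by decide)]
    simpa [simAuxA, simAuxB] using ih
  | case4 rest line lines ih =>
    rw [splitCR.eq_2, splitCR_cons_ne '\n' rest (by decide)]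
    simpa [simAuxA, simAuxB] using ih
  | case5 rest _line lines h1 h2 ih =>
    rw [splitCR.eq_2]
    simp only [List.tail_cons, List.headI_cons, List.append_nil]
    rw [simAuxB_lone rest _line lines h1 h2]
    simpa [simAuxA] using ih
  | case6 c rest line lines h1 h2 hc ih =>
    rw [splitCR_cons_ne c rest (fun h => hc h)]
    simp only [List.tail_cons, List.headI_cons]
    rw [show line ++ c :: (splitCR rest).headI = (line ++ [c]) ++ (splitCR rest).headI by simp]
    rw [ih]
    rw [simAuxA.eq_5 line lines c rest (fun r1 h hr => h1 r1 h hr) (fun r1 h hr => h2 r1 h hr)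
      (fun h => hc h)]

-- ===== VERDICT (by name: the statement is the Claim_ definition above) =====
theorem simulate_output_spec : Claim_equal_simulate_output := by
  intro input _
  show simulate_output input = simulate_output_alt input
  show String.mk (['\n'].intercalate (simAuxA input.toList [] []))
    = String.mk (['\n'].intercalate (simAuxB (splitCR input.toList).tail (splitCR input.toList).headI []))
  rw [show simAuxB (splitCR input.toList).tail (splitCR input.toList).headI []
      = simAuxA input.toList [] [] from by simpa using simAuxA_eq_simAuxB input.toList [] []]
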